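-- pv_equiv track=rewrite | github.com/andrewguo5/mbHUD | poker_hud/hand_parser.py | split_into_hands
-- ===== SOURCE A (Python) =====
-- from typing import List, Optional
--
-- def split_into_hands(content: str) -> List[str]:
--     """
--     Split a hand history file into individual hands.
--
--     Each hand starts with "Hand #" and continues until the next "Hand #" or EOF.
--
--     Args:
--         content: Full content of a hand history file
--
--     Returns:
--         List of hand strings, each representing one complete hand
--     """
--     lines = content.split('\n')
--     hands = []
--     current_hand = []
--
--     for line in lines:
--         if line.startswith('Hand #'):
--             # Start of a new hand
--             if current_hand:
--                 # Save the previous hand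
--                 hands.append('\n'.join(current_hand))
--             current_hand = [line]
--         else:
--             if current_hand:  # Only add if we're inside a hand
--                 current_hand.append(line)
--
--     # Don't forget the last hand
--     if current_hand:
--         hands.append('\n'.join(current_hand))
--
--     return hands
-- ===== SOURCE B (Python) =====
-- from typing import List
--
-- def split_into_hands(content: str) -> List[str]:
--     """Recursive span-based grouping: skip the prefix before the first
--     boundary line, then repeatedly peel off one hand = boundary line plus
--     the following non-boundary lines."""
--     lines = content.split('\n')
--
--     def is_boundary(line):
--         return line.startswith('Hand #')
--
--     def rec(ls):
--         if not ls:
--             return []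
--         rest = ls[1:]
--         body = []
--         while rest and not is_boundary(rest[0]):
--             body.append(rest[0])
--             rest = rest[1:]
--         return ['\n'.join([ls[0]] + body)] + rec(rest)
--
--     rest = lines
--     while rest and not is_boundary(rest[0]):
--         rest = rest[1:]
--     return rec(rest)
-- ===== Notes on version B (the rewrite author's own statement) =====
-- stated objective: alternative
-- what changed: Replaces A's single accumulator fold carrying (hands, current_hand) state with a recursive span-based grouping: skip the non-boundary prefix, then repeatedly peel one hand (boundary line + following non-boundary lines) per recursive step.
import Mathlib
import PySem

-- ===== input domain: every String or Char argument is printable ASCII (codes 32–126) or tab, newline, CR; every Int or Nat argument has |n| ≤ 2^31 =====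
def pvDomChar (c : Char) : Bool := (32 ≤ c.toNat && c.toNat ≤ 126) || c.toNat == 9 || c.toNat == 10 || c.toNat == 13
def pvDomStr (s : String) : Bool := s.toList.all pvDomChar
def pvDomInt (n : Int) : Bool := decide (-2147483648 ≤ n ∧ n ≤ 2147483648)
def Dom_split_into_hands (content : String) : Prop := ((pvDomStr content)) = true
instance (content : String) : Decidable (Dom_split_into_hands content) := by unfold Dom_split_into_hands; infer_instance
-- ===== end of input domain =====

-- B replaces A's accumulator fold (hands, current_hand) by a recursive span-based
-- grouping (skip prefix, then peel one hand per step); objective: alternative decomposition.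

-- ===== PORT A =====
-- one iteration of A's for-loop over (hands, current_hand)
def splitAStep (st : List String × List String) (line : String) : List String × List String :=
  if PySem.Str.startswith line "Hand #" then
    ((if st.2 ≠ [] then st.1 ++ [PySem.Str.join "\n" st.2] else st.1), [line])
  else
    (st.1, if st.2 ≠ [] then st.2 ++ [line] else st.2)

-- the trailing "if current_hand: hands.append(...)"
def splitAFinish (st : List String × List String) : List String :=
  if st.2 ≠ [] then st.1 ++ [PySem.Str.join "\n" st.2] else st.1

def split_into_hands (content : String) : List String :=
  splitAFinish (((PySem.Str.split? content "\n").getD []).foldl splitAStep ([], []))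

-- ===== PORT B =====
def isBoundary (line : String) : Bool := PySem.Str.startswith line "Hand #"

-- Source B's rec: the inner while loop collecting body / advancing rest is the
-- takeWhile/dropWhile pair over the same predicate
def splitBRec (ls : List String) : List String :=
  match ls with
  | [] => []
  | h :: rest =>
      PySem.Str.join "\n" (h :: rest.takeWhile (fun l => !isBoundary l))
        :: splitBRec (rest.dropWhile (fun l => !isBoundary l))
termination_by ls.length
decreasing_by
  simp only [List.length_cons]
  exact Nat.lt_succ_of_le (List.length_dropWhile_le _ _)

def split_into_hands_alt (content : String) : List String :=
  splitBRec (((PySem.Str.split? content "\n").getD []).dropWhile (fun l => !isBoundary l))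

-- ===== PRECONDITION & SPEC =====
def Spec_split_into_hands (content : String) (out : List String) : Prop := out = split_into_hands_alt content
instance (content : String) (out : List String) : Decidable (Spec_split_into_hands content out) := by unfold Spec_split_into_hands; infer_instance

-- ===== CLAIM (what is proved, stated in full; the proofs are below) =====
def Claim_equal_split_into_hands : Prop := ∀ (content : String), Dom_split_into_hands content → Spec_split_into_hands content (split_into_hands content)

-- ===== LEMMAS AND PROOFS =====

-- invariant while inside a hand: current_hand nonempty
theorem splitA_inside (ls : List String) : ∀ (hands cur : List String), cur ≠ [] →
    splitAFinish (ls.foldl splitAStep (hands, cur))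
      = hands ++ PySem.Str.join "\n" (cur ++ ls.takeWhile (fun l => !isBoundary l))
          :: splitBRec (ls.dropWhile (fun l => !isBoundary l)) := by
  induction ls with
  | nil =>
      intro hands cur hc
      simp [splitAFinish, splitBRec, hc]
  | cons l ls ih =>
      intro hands cur hc
      by_cases hb : isBoundary l
      · have : splitAStep (hands, cur) l = (hands ++ [PySem.Str.join "\n" cur], [l]) := by
          simp [splitAStep, isBoundary] at hb ⊢
          simp [hb, hc]
        rw [List.foldl_cons, this, ih _ _ (by simp)]
        rw [List.takeWhile_cons, List.dropWhile_cons]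
        simp [hb, splitBRec]
      · have : splitAStep (hands, cur) l = (hands, cur ++ [l]) := by
          simp [splitAStep, isBoundary] at hb ⊢
          simp [hb, hc]
        rw [List.foldl_cons, this, ih _ _ (by simp [hc])]
        rw [List.takeWhile_cons, List.dropWhile_cons]
        simp [hb]

-- before the first boundary: current_hand empty, lines dropped
theorem splitA_outside (ls : List String) : ∀ (hands : List String),
    splitAFinish (ls.foldl splitAStep (hands, []))
      = hands ++ splitBRec (ls.dropWhile (fun l => !isBoundary l)) := by
  induction ls with
  | nil => intro hands; simp [splitAFinish, splitBRec]
  | cons l ls ih =>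
      intro hands
      by_cases hb : isBoundary l
      · have hs : splitAStep (hands, []) l = (hands, [l]) := by
          simp [splitAStep, isBoundary] at hb ⊢
          simp [hb]
        rw [List.foldl_cons, hs, splitA_inside ls hands [l] (by simp)]
        rw [List.dropWhile_cons]
        simp [hb, splitBRec]
      · have hs : splitAStep (hands, []) l = (hands, []) := by
          simp [splitAStep, isBoundary] at hb ⊢
          simp [hb]
        rw [List.foldl_cons, hs, ih]
        rw [List.dropWhile_cons]
        simp [hb]

-- ===== VERDICT (by name: the statement is the Claim_ definition above) =====
theorem split_into_hands_spec : Claim_equal_split_into_hands := by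
  intro content _
  unfold Spec_split_into_hands split_into_hands split_into_hands_alt
  rw [splitA_outside]
  simp
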